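-- pv_equiv track=rewrite | github.com/showlab/GEB-Plus | utils/evaluation_utils.py | split_pred_parts
-- ===== SOURCE A (Python) =====
-- from builtins import dict
--
-- def split_pred_parts(pred):
--     pred_dict = dict(
--         subject=dict(),
--         before=dict(),
--         after=dict()
--     )
--     for bid, cap in pred.items():
--         part_list = cap[0].split('/ /')
--         pred_dict['subject'][bid] = [part_list[0].split(':')[-1].strip()]
--         if len(part_list) < 1:
--             pred_dict['subject'][bid] = [' ']
--         else:
--             pred_dict['subject'][bid] = [part_list[0].split(':')[-1].strip()]
--         if len(part_list) < 2:
--             pred_dict['before'][bid] = [' ']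
--         else:
--             pred_dict['before'][bid] = [part_list[1].split(':')[-1].strip()]
--         if len(part_list) < 3:
--             pred_dict['after'][bid] = [' ']
--         else:
--             pred_dict['after'][bid] = [part_list[2].split(':')[-1].strip()]
--     return pred_dict
-- ===== SOURCE B (Python) =====
-- def split_pred_parts(pred):
--     def field(cap, i):
--         parts = cap[0].split('/ /')
--         return [parts[i].split(':')[-1].strip()] if i < len(parts) else [' ']
--     return {cat: {bid: field(cap, i) for bid, cap in pred.items()}
--             for i, cat in enumerate(('subject', 'before', 'after'))}
-- ===== Notes on version B (the rewrite author's own statement) =====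
-- stated objective: idiomatic
-- what changed: B transposes the traversal: instead of A's single pass over the items that fills three dicts with hardcoded if/else branches, B makes one staged pass per category (a nested dict comprehension over enumerate of the category names), extracting each field with one shared helper; correct because the three fields of each caption are independent.
import Mathlib
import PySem

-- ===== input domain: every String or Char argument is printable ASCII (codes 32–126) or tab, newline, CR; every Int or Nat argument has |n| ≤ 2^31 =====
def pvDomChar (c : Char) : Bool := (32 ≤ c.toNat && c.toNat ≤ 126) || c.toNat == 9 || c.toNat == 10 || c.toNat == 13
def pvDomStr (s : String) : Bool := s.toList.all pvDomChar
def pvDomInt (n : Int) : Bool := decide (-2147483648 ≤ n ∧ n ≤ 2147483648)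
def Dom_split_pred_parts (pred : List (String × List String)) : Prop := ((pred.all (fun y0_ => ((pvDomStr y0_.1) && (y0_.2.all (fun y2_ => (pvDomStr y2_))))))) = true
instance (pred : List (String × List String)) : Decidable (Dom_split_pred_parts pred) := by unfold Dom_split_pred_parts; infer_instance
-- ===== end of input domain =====

-- B transposes the traversal into one staged pass per category (map over the enumerated category
-- names, each building its dict over the items), instead of A's single item pass filling three
-- dicts with hardcoded if/else branches (idiomatic).


-- shared subexpression of both Pythons: s.split(':')[-1].strip()
def pvSplitColonStrip (s : String) : String :=
  PySem.Str.strip ((PySem.List.pyGet? ((PySem.Str.split? s ":").getD []) (-1)).getD "")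

-- ===== PORT A =====
-- loop body of A: one iteration over (bid, cap), threading the (subject, before, after) sub-dicts
def pvStepA
    (st : PySem.Dict String (List String) × PySem.Dict String (List String) × PySem.Dict String (List String))
    (bc : String × List String) :
    PySem.Dict String (List String) × PySem.Dict String (List String) × PySem.Dict String (List String) :=
  let bid := bc.1
  let part_list := (PySem.Str.split? ((PySem.List.pyGet? bc.2 0).getD "") "/ /").getD []
  -- first (unconditional, immediately overwritten) assignment to pred_dict['subject'][bid]
  let subj := st.1.insert bid [pvSplitColonStrip ((PySem.List.pyGet? part_list 0).getD "")]
  let subj := if part_list.length < 1 then subj.insert bid [" "]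
              else subj.insert bid [pvSplitColonStrip ((PySem.List.pyGet? part_list 0).getD "")]
  let bef := if part_list.length < 2 then st.2.1.insert bid [" "]
             else st.2.1.insert bid [pvSplitColonStrip ((PySem.List.pyGet? part_list 1).getD "")]
  let aft := if part_list.length < 3 then st.2.2.insert bid [" "]
             else st.2.2.insert bid [pvSplitColonStrip ((PySem.List.pyGet? part_list 2).getD "")]
  (subj, bef, aft)

def split_pred_parts (pred : List (String × List String)) : List (String × List (String × List String)) :=
  [("subject", (pred.foldl pvStepA (PySem.Dict.empty, PySem.Dict.empty, PySem.Dict.empty)).1.items),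
   ("before", (pred.foldl pvStepA (PySem.Dict.empty, PySem.Dict.empty, PySem.Dict.empty)).2.1.items),
   ("after", (pred.foldl pvStepA (PySem.Dict.empty, PySem.Dict.empty, PySem.Dict.empty)).2.2.items)]

-- ===== PORT B =====
-- B's helper field(cap, i)
def pvField (cap : List String) (i : Int) : List String :=
  let parts := (PySem.Str.split? ((PySem.List.pyGet? cap 0).getD "") "/ /").getD []
  if i < (parts.length : Int) then [pvSplitColonStrip ((PySem.List.pyGet? parts i).getD "")]
  else [" "]

def split_pred_parts_alt (pred : List (String × List String)) : List (String × List (String × List String)) :=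
  (PySem.List.enumerate ["subject", "before", "after"]).map
    (fun ic =>
      (ic.2,
       (pred.foldl (fun m bc => m.insert bc.1 (pvField bc.2 ic.1))
          (PySem.Dict.empty : PySem.Dict String (List String))).items))

-- ===== PRECONDITION & SPEC =====
-- Pre_ excludes entries whose caption list is empty: there A's cap[0] raises IndexError (B's does too).
def Pre_split_pred_parts (pred : List (String × List String)) : Prop := ∀ p ∈ pred, p.2 ≠ []
instance (pred : List (String × List String)) : Decidable (Pre_split_pred_parts pred) := by
  unfold Pre_split_pred_parts; infer_instance

def pvWitness_split_pred_parts : (List (String × List String)) := [("b1", ["s: dog/ /x: eats"])]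

def Spec_split_pred_parts (pred : List (String × List String)) (out : List (String × List (String × List String))) : Prop := out = split_pred_parts_alt pred
instance (pred : List (String × List String)) (out : List (String × List (String × List String))) : Decidable (Spec_split_pred_parts pred out) := by unfold Spec_split_pred_parts; infer_instance

-- ===== CLAIM (what is proved, stated in full; the proofs are below) =====
def Claim_equal_split_pred_parts : Prop := ∀ (pred : List (String × List String)), Dom_split_pred_parts pred → Pre_split_pred_parts pred → Spec_split_pred_parts pred (split_pred_parts pred)

-- ===== LEMMAS AND PROOFS =====

-- overwriting the same key twice is one insert (A assigns pred_dict['subject'][bid] twice)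
theorem pv_insert_insert_self {κ ν : Type} [BEq κ] [LawfulBEq κ]
    (d : PySem.Dict κ ν) (k : κ) (v w : ν) :
    (d.insert k v).insert k w = d.insert k w := by
  apply PySem.Dict.ext
  by_cases h : d.contains k = true
  · simp [PySem.Dict.items_insert, h, PySem.Dict.contains_insert_self, List.map_map]
    intro a b _
    by_cases hp : a == k <;> simp [hp]
  · have h' : d.contains k = false := by simpa using h
    simp only [PySem.Dict.items_insert, h', PySem.Dict.contains_insert_self, if_true, if_false,
      Bool.false_eq_true]
    have hfix : ∀ p ∈ d.items, (fun p : κ × ν => if (p.1 == k) = true then (k, w) else p) p = p := by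
      intro p hp
      have hk : p.1 ∈ d.keys := PySem.Dict.mem_keys_of_mem_items d hp
      have : p.1 ≠ k := fun e => by
        rw [e] at hk
        exact absurd ((PySem.Dict.contains_iff_mem_keys d k).mpr hk) (by simp [h'])
      simp [this]
    rw [List.map_append, List.map_congr_left hfix]
    simp

-- B's guarded field value equals A's i-th if/else branch value
theorem pv_field_eq (cap : List String) (i : Nat) :
    pvField cap (i : Int) =
      (if ((PySem.Str.split? ((PySem.List.pyGet? cap 0).getD "") "/ /").getD []).length < i + 1
        then [" "]
        else [pvSplitColonStrip
          ((PySem.List.pyGet? ((PySem.Str.split? ((PySem.List.pyGet? cap 0).getD "") "/ /").getD []) (i : Int)).getD "")]) := by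
  unfold pvField
  generalize ((PySem.Str.split? ((PySem.List.pyGet? cap 0).getD "") "/ /").getD []) = pl
  by_cases h : i < pl.length
  · simp [show ((i : Int) < (pl.length : Int)) by exact_mod_cast h, Nat.not_lt.mpr (Nat.succ_le_of_lt h)]
  · simp [show ¬ ((i : Int) < (pl.length : Int)) by exact_mod_cast h, Nat.lt_succ_of_le (Nat.le_of_not_lt h)]

-- each component of A's fold is B's per-category fold
theorem pv_fold_subject (pred : List (String × List String))
    (s b a : PySem.Dict String (List String)) :
    (pred.foldl pvStepA (s, b, a)).1 =
      pred.foldl (fun m bc => m.insert bc.1 (pvField bc.2 ((0 : Nat) : Int))) s := by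
  induction pred generalizing s b a with
  | nil => rfl
  | cons hd tl ih =>
      simp only [List.foldl_cons]
      rw [show pvStepA (s, b, a) hd =
          (s.insert hd.1 (pvField hd.2 ((0 : Nat) : Int)),
           (pvStepA (s, b, a) hd).2) by
        simp only [pvStepA, pv_field_eq, pv_insert_insert_self]
        rw [← apply_ite (s.insert hd.1)]
        norm_num]
      exact ih _ _ _

theorem pv_fold_before (pred : List (String × List String))
    (s b a : PySem.Dict String (List String)) :
    (pred.foldl pvStepA (s, b, a)).2.1 =
      pred.foldl (fun m bc => m.insert bc.1 (pvField bc.2 ((1 : Nat) : Int))) b := by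
  induction pred generalizing s b a with
  | nil => rfl
  | cons hd tl ih =>
      simp only [List.foldl_cons]
      rw [show pvStepA (s, b, a) hd =
          ((pvStepA (s, b, a) hd).1,
           b.insert hd.1 (pvField hd.2 ((1 : Nat) : Int)),
           (pvStepA (s, b, a) hd).2.2) by
        simp only [pvStepA, pv_field_eq]
        rw [← apply_ite (b.insert hd.1)]
        norm_num]
      exact ih _ _ _

theorem pv_fold_after (pred : List (String × List String))
    (s b a : PySem.Dict String (List String)) :
    (pred.foldl pvStepA (s, b, a)).2.2 =
      pred.foldl (fun m bc => m.insert bc.1 (pvField bc.2 ((2 : Nat) : Int))) a := by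
  induction pred generalizing s b a with
  | nil => rfl
  | cons hd tl ih =>
      simp only [List.foldl_cons]
      rw [show pvStepA (s, b, a) hd =
          ((pvStepA (s, b, a) hd).1, (pvStepA (s, b, a) hd).2.1,
           a.insert hd.1 (pvField hd.2 ((2 : Nat) : Int))) by
        simp only [pvStepA, pv_field_eq]
        rw [← apply_ite (a.insert hd.1)]
        norm_num]
      exact ih _ _ _

-- ===== VERDICT (by name: the statement is the Claim_ definition above) =====
theorem split_pred_parts_spec : Claim_equal_split_pred_parts := by
  intro pred _ _
  unfold Spec_split_pred_parts split_pred_parts split_pred_parts_alt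
  simp only [PySem.List.enumerate_cons, PySem.List.enumerate_nil, List.map_cons, List.map_nil]
  rw [pv_fold_subject, pv_fold_before, pv_fold_after]
  norm_num
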